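-- pv_equiv track=rewrite | github.com/TuanBuiDucVolsu/ReqPilot | mbwnext_reqpilot/mbwnext_reqpilot/api/reqpilot.py | _normalize_paragraphs
-- ===== SOURCE A (Python) =====
-- def _normalize_paragraphs(raw: str) -> str:
-- 	"""Gộp các dòng liên tiếp thành đoạn văn, giữ lại khoảng trắng hợp lý."""
-- 	lines = [ln.strip() for ln in (raw or "").splitlines()]
-- 	paragraphs = []
-- 	buf = []
--
-- 	for ln in lines:
-- 		# Dòng trống: kết thúc một đoạn
-- 		if not ln:
-- 			if buf:
-- 				paragraphs.append(" ".join(buf))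
-- 				buf = []
-- 			continue
-- 		buf.append(ln)
--
-- 	if buf:
-- 		paragraphs.append(" ".join(buf))
--
-- 	# Giới hạn chiều rộng hiển thị để dễ đọc, nhưng vẫn là text thuần
-- 	return "\n\n".join(paragraphs)
-- ===== SOURCE B (Python) =====
-- def _normalize_paragraphs(raw: str) -> str:
-- 	"""Merge runs of consecutive non-blank lines into single-space paragraphs."""
-- 	def paras(ls):
-- 		# recursive run-extraction: skip blank lines, slice off each maximal
-- 		# run of non-blank lines as one paragraph
-- 		if not ls:
-- 			return []
-- 		if not ls[0]:
-- 			return paras(ls[1:])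
-- 		i = 1
-- 		while i < len(ls) and ls[i]:
-- 			i += 1
-- 		return [" ".join(ls[:i])] + paras(ls[i:])
--
-- 	lines = [ln.strip() for ln in (raw or "").splitlines()]
-- 	return "\n\n".join(paras(lines))
-- ===== Notes on version B (the rewrite author's own statement) =====
-- stated objective: alternative
-- what changed: Replaces the stateful buffer/flush accumulator scan with a recursive run-extraction: each maximal run of non-blank stripped lines is sliced off as one paragraph (skip a blank, or take the leading non-blank run and recurse on the rest).
import Mathlib
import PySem

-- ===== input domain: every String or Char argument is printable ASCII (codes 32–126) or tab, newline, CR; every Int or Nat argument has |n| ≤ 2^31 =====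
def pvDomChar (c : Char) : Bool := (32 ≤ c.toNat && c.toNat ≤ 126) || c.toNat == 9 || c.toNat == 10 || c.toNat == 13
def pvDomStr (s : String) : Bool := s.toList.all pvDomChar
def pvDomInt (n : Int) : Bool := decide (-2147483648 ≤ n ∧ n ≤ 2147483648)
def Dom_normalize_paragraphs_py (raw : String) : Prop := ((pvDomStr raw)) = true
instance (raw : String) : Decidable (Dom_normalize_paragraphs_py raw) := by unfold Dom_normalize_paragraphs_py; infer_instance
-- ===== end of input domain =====

-- B merges each maximal run of non-blank stripped lines by recursive run-extraction
-- instead of A's stateful buffer/flush scan; same O(n) cost, equivalence proved below.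

-- ===== PORT A =====
-- one fold step of A's loop: state = (paragraphs, buf)
def pvStepA (st : List String × List String) (ln : String) : List String × List String :=
  if ln = "" then
    if st.2 ≠ [] then (st.1 ++ [PySem.Str.join " " st.2], []) else st
  else (st.1, st.2 ++ [ln])

def normalize_paragraphs_py (raw : String) : String :=
  -- 'raw or ""' is the identity on strings here (falsy string = ""), so raw is used directly
  let lines := (PySem.Str.splitlines raw).map PySem.Str.strip
  let st := lines.foldl pvStepA ([], [])
  let paragraphs := if st.2 ≠ [] then st.1 ++ [PySem.Str.join " " st.2] else st.1
  PySem.Str.join "\n\n" paragraphs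

-- ===== PORT B =====
-- Source B's recursive 'paras': skip a blank line, or slice off the leading run of
-- non-blank lines (the while loop computing i is the takeWhile/dropWhile split)
def pvAltParas : List String → List String
  | [] => []
  | l :: ls =>
    if l = "" then pvAltParas ls
    else PySem.Str.join " " (l :: ls.takeWhile (fun s => s ≠ ""))
         :: pvAltParas (ls.dropWhile (fun s => s ≠ ""))
termination_by ls => ls.length
decreasing_by
  · simp
  · have := List.length_dropWhile_le (fun s => decide (s ≠ "")) ls
    simp at this ⊢
    omega

def normalize_paragraphs_py_alt (raw : String) : String :=
  PySem.Str.join "\n\n" (pvAltParas ((PySem.Str.splitlines raw).map PySem.Str.strip))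

-- ===== PRECONDITION & SPEC =====
def Spec_normalize_paragraphs_py (raw : String) (out : String) : Prop := out = normalize_paragraphs_py_alt raw
instance (raw : String) (out : String) : Decidable (Spec_normalize_paragraphs_py raw out) := by unfold Spec_normalize_paragraphs_py; infer_instance

-- ===== CLAIM (what is proved, stated in full; the proofs are below) =====
def Claim_equal_normalize_paragraphs_py : Prop := ∀ (raw : String), Dom_normalize_paragraphs_py raw → Spec_normalize_paragraphs_py raw (normalize_paragraphs_py raw)

-- ===== LEMMAS AND PROOFS =====

-- final flush of A's state
def pvFlush (st : List String × List String) : List String :=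
  if st.2 ≠ [] then st.1 ++ [PySem.Str.join " " st.2] else st.1

lemma pvStepA_blank_flush (ps buf : List String) (hb : buf ≠ []) :
    pvStepA (ps, buf) "" = (ps ++ [PySem.Str.join " " buf], []) := by
  simp [pvStepA, hb]

lemma pvStepA_blank_nil (ps : List String) : pvStepA (ps, []) "" = (ps, []) := by
  simp [pvStepA]

lemma pvStepA_nonblank (ps buf : List String) (l : String) (hl : l ≠ "") :
    pvStepA (ps, buf) l = (ps, buf ++ [l]) := by
  simp [pvStepA, hl]

lemma pvRun_append {bs : List String} (h : ∀ b ∈ bs, b ≠ "") (ls : List String) :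
    (bs ++ "" :: ls).takeWhile (fun s => s ≠ "") = bs ∧
    (bs ++ "" :: ls).dropWhile (fun s => s ≠ "") = "" :: ls := by
  induction bs with
  | nil => simp
  | cons b bs ih =>
    have hb : b ≠ "" := h b (by simp)
    have ih' := ih (fun x hx => h x (by simp [hx]))
    simp only [ne_eq, decide_not] at ih' ⊢
    simp [hb, ih'.1, ih'.2]

lemma pvRun_self {bs : List String} (h : ∀ b ∈ bs, b ≠ "") :
    bs.takeWhile (fun s => s ≠ "") = bs ∧ bs.dropWhile (fun s => s ≠ "") = [] := by
  induction bs with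
  | nil => simp
  | cons b bs ih =>
    have hb : b ≠ "" := h b (by simp)
    have ih' := ih (fun x hx => h x (by simp [hx]))
    simp only [ne_eq, decide_not] at ih' ⊢
    simp [hb, ih'.1, ih'.2]

lemma pvAltParas_all {bs : List String} (h : ∀ b ∈ bs, b ≠ "") :
    pvAltParas bs = if bs = [] then [] else [PySem.Str.join " " bs] := by
  cases bs with
  | nil => simp [pvAltParas]
  | cons b bs =>
    have hb : b ≠ "" := h b (by simp)
    have hr := pvRun_self (bs := bs) (fun x hx => h x (by simp [hx]))
    rw [pvAltParas, hr.1, hr.2]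
    simp [hb, pvAltParas]

lemma pvFold_eq (lines : List String) : ∀ (ps buf : List String), (∀ b ∈ buf, b ≠ "") →
    pvFlush (lines.foldl pvStepA (ps, buf)) = ps ++ pvAltParas (buf ++ lines) := by
  induction lines with
  | nil =>
    intro ps buf h
    simp only [List.foldl, List.append_nil]
    rw [pvAltParas_all h]
    by_cases hb : buf = [] <;> simp [pvFlush, hb]
  | cons l ls ih =>
    intro ps buf h
    by_cases hl : l = ""
    · subst hl
      by_cases hb : buf = []
      · subst hb
        rw [List.foldl_cons, pvStepA_blank_nil, ih ps [] (by simp)]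
        simp [pvAltParas]
      · obtain ⟨b, bs, rfl⟩ := List.exists_cons_of_ne_nil hb
        have hb0 : b ≠ "" := h b (by simp)
        have hr := pvRun_append (bs := bs) (fun x hx => h x (by simp [hx])) ls
        have key := ih (ps ++ [PySem.Str.join " " (b :: bs)]) [] (by simp)
        simp only [List.nil_append] at key
        rw [List.foldl_cons, pvStepA_blank_flush _ _ hb, key,
            List.cons_append, pvAltParas, hr.1, hr.2]
        simp [hb0, pvAltParas]
    · have key := ih ps (buf ++ [l]) (by
        intro x hx
        rcases List.mem_append.1 hx with hx | hx
        · exact h x hx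
        · simp at hx; simpa [hx])
      rw [List.foldl_cons, pvStepA_nonblank _ _ _ hl, key]
      simp

-- ===== VERDICT (by name: the statement is the Claim_ definition above) =====
theorem normalize_paragraphs_py_spec : Claim_equal_normalize_paragraphs_py := by
  intro raw _
  unfold Spec_normalize_paragraphs_py normalize_paragraphs_py normalize_paragraphs_py_alt
  have key := pvFold_eq ((PySem.Str.splitlines raw).map PySem.Str.strip) [] [] (by simp)
  simp only [pvFlush, List.nil_append] at key
  dsimp only
  rw [key]
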